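-- pv_equiv track=rewrite | github.com/alvinwan/timefhuman | timefhuman/tokenize.py | clean_dash_tokens
-- ===== SOURCE A (Python) =====
-- def clean_dash_tokens(tokens):
--     """Clean up dash tokens.
--
--     - If the dash-delimited values are not integers, the values joined by dashes
--       will need further parsing.
--
--     >>> list(clean_dash_tokens(['7-18', '3', 'pm-']))
--     ['7-18', '3', 'pm', '-']
--     >>> list(clean_dash_tokens(['7/17-7/18']))
--     ['7/17', '-', '7/18']
--     """
--     for token in tokens:
--         if '-' in token:
--             parts = token.split('-')
--             if not all([s.isdigit() for s in parts]):
--                 if parts[0]: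
--                     yield parts[0]
--                 for part in parts[1:]:
--                     yield '-'
--                     if part:
--                         yield part
--                 continue
--         yield token
-- ===== SOURCE B (Python) =====
-- def clean_dash_tokens(tokens):
--     """Same behaviour as A, but flagged tokens are re-emitted by a single
--     character scan with a run accumulator instead of iterating over the
--     split parts."""
--     for token in tokens:
--         if '-' in token and not all(s.isdigit() for s in token.split('-')):
--             run = ''
--             for ch in token:
--                 if ch == '-':
--                     if run:
--                         yield run
--                     run = ''
--                     yield '-'
--                 else:
--                     run += ch
--             if run:
--                 yield run
--         else:
--             yield token
-- ===== Notes on version B (the rewrite author's own statement) =====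
-- stated objective: alternative
-- what changed: Flagged tokens are re-emitted by a single left-to-right character scan with a run accumulator (yielding dashes and nonempty runs as they are completed) instead of indexing into the list of split parts and interleaving dashes between them.
import Mathlib
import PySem

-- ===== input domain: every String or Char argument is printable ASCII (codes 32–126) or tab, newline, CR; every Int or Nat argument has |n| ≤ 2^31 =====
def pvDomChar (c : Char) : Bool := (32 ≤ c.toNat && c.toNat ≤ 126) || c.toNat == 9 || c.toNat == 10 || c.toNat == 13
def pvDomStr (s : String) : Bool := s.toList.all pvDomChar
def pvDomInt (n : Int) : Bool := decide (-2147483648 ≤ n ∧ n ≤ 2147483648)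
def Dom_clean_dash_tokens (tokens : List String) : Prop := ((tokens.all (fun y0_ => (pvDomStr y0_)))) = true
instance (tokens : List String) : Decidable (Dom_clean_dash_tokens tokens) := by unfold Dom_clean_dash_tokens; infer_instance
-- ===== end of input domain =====

-- B re-emits flagged tokens by a single character scan with a run accumulator
-- instead of iterating over the split parts (alternative decomposition, same cost).


-- ===== PORT A =====
-- token.split('-') with the nonempty separator "-" is exactly
-- (PySem.Chars.splitOn token.toList ['-']).map String.ofList (= PySem.Str.split? token "-").
-- parts is never empty (split always returns at least one piece), so parts[0] is parts.headD "".
def clean_dash_tokens (tokens : List String) : List String :=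
  tokens.foldl (fun acc token =>
    if PySem.Str.isIn "-" token then
      let parts : List String := (PySem.Chars.splitOn token.toList ['-']).map String.ofList
      if !(parts.map PySem.Str.strIsdigit).all (· = true) then
        (acc ++ (if parts.headD "" ≠ "" then [parts.headD ""] else []))
          ++ (parts.drop 1).foldl
              (fun a part => (a ++ ["-"]) ++ (if part ≠ "" then [part] else [])) []
      else acc ++ [token]
    else acc ++ [token]) []

-- ===== PORT B =====
-- the inner character loop of Source B: run accumulator, dashes emitted as their own tokens
def bScan : List Char → List Char → List String
  | [], run => if run.isEmpty then [] else [String.ofList run]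
  | c :: rest, run =>
      if c = '-' then
        (if run.isEmpty then [] else [String.ofList run]) ++ "-" :: bScan rest []
      else bScan rest (run ++ [c])

def clean_dash_tokens_alt (tokens : List String) : List String :=
  tokens.foldl (fun acc token =>
    if PySem.Str.isIn "-" token &&
        !(((PySem.Chars.splitOn token.toList ['-']).map String.ofList).map
            PySem.Str.strIsdigit).all (· = true) then
      acc ++ bScan token.toList []
    else acc ++ [token]) []

-- ===== PRECONDITION & SPEC =====
def Spec_clean_dash_tokens (tokens : List String) (out : List String) : Prop := out = clean_dash_tokens_alt tokens
instance (tokens : List String) (out : List String) : Decidable (Spec_clean_dash_tokens tokens out) := by unfold Spec_clean_dash_tokens; infer_instance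

-- ===== CLAIM (what is proved, stated in full; the proofs are below) =====
def Claim_equal_clean_dash_tokens : Prop := ∀ (tokens : List String), Dom_clean_dash_tokens tokens → Spec_clean_dash_tokens tokens (clean_dash_tokens tokens)

-- ===== LEMMAS AND PROOFS =====

-- structural version of split-on-'-'
def mySplit : List Char → List Char → List (List Char)
  | [], cur => [cur.reverse]
  | c :: rest, cur => if c = '-' then cur.reverse :: mySplit rest [] else mySplit rest (c :: cur)

theorem go_spec : ∀ (fuel : Nat) (l cur : List Char) (acc : List (List Char)),
    l.length < fuel →
    PySem.Chars.splitOn.go ['-'] fuel l cur acc = acc.reverse ++ mySplit l cur := by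
  intro fuel
  induction fuel with
  | zero => intro l cur acc h; omega
  | succ n ih =>
    intro l cur acc h
    cases l with
    | nil => simp [PySem.Chars.splitOn.go, mySplit]
    | cons c rest =>
      by_cases hc : c = '-'
      · subst hc
        have : PySem.Chars.splitOn.go ['-'] (n+1) ('-' :: rest) cur acc
            = PySem.Chars.splitOn.go ['-'] n rest [] (cur.reverse :: acc) := by
          simp [PySem.Chars.splitOn.go, List.isPrefixOf]
        rw [this, ih rest [] (cur.reverse :: acc) (by simpa using Nat.lt_of_succ_lt_succ h)]
        simp [mySplit]
      · have : PySem.Chars.splitOn.go ['-'] (n+1) (c :: rest) cur acc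
            = PySem.Chars.splitOn.go ['-'] n rest (c :: cur) acc := by
          simp only [PySem.Chars.splitOn.go, List.isPrefixOf,
            Bool.and_true, beq_iff_eq]
          rw [if_neg (fun h' => hc h'.symm)]
        rw [this, ih rest (c :: cur) acc (by simpa using Nat.lt_of_succ_lt_succ h)]
        simp [mySplit, hc]

theorem splitOn_eq_mySplit (cs : List Char) :
    PySem.Chars.splitOn cs ['-'] = mySplit cs [] := by
  unfold PySem.Chars.splitOn
  rw [go_spec (cs.length + 1) cs [] [] (by omega)]
  simp

theorem mySplit_ne_nil : ∀ (cs cur : List Char), mySplit cs cur ≠ [] := by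
  intro cs
  induction cs with
  | nil => intro cur; simp [mySplit]
  | cons c rest ih =>
    intro cur
    by_cases hc : c = '-' <;> simp [mySplit, hc, ih]

-- what B emits for one later part
def emitPart (p : List Char) : List String :=
  "-" :: (if p ≠ [] then [String.ofList p] else [])

-- what both programs emit given the split parts
def emitH (ps : List (List Char)) : List String :=
  (if ps.headD [] ≠ [] then [String.ofList (ps.headD [])] else [])
    ++ (ps.drop 1).flatMap emitPart

theorem bScan_eq : ∀ (cs run : List Char), bScan cs run = emitH (mySplit cs run.reverse) := by
  intro cs
  induction cs with
  | nil =>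
    intro run
    simp [bScan, emitH, mySplit, List.isEmpty_iff]
  | cons c rest ih =>
    intro run
    by_cases hc : c = '-'
    · subst hc
      have h1 : bScan ('-' :: rest) run
          = (if run.isEmpty then [] else [String.ofList run]) ++ "-" :: bScan rest [] := by
        simp [bScan]
      rw [h1, ih []]
      have h2 : mySplit ('-' :: rest) run.reverse = run :: mySplit rest [] := by
        simp [mySplit]
      rw [h2]
      obtain ⟨p, ps, hps⟩ := List.exists_cons_of_ne_nil (mySplit_ne_nil rest [])
      simp [emitH, emitPart, List.isEmpty_iff, hps]
    · have h1 : bScan (c :: rest) run = bScan rest (run ++ [c]) := by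
        simp [bScan, hc]
      rw [h1, ih (run ++ [c])]
      have h2 : mySplit (c :: rest) run.reverse = mySplit rest (c :: run.reverse) := by
        simp [mySplit, hc]
      rw [h2]
      simp

theorem ofList_ne_empty_iff (p : List Char) : (String.ofList p ≠ "") ↔ p ≠ [] := by
  constructor
  · intro h hp; exact h (by simp [hp])
  · intro h hc
    apply h
    have := congrArg String.toList hc
    simpa using this

theorem foldA_eq_flatMap (ps : List String) :
    ps.foldl (fun a part => (a ++ ["-"]) ++ (if part ≠ "" then [part] else [])) [] =
      ps.flatMap (fun part => "-" :: (if part ≠ "" then [part] else [])) := by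
  have h : (fun (a : List String) part => (a ++ ["-"]) ++ (if part ≠ "" then [part] else []))
      = fun a part => a ++ ("-" :: (if part ≠ "" then [part] else [])) := by
    funext a part; simp
  rw [h, PySem.List.foldl_append_eq_flatMap]
  simp

-- per-token: the two emission strategies agree
theorem token_emit_eq (token : String) :
    (if ((PySem.Chars.splitOn token.toList ['-']).map String.ofList).headD "" ≠ "" then
        [((PySem.Chars.splitOn token.toList ['-']).map String.ofList).headD ""] else [])
      ++ (((PySem.Chars.splitOn token.toList ['-']).map String.ofList).drop 1).foldl
            (fun a part => (a ++ ["-"]) ++ (if part ≠ "" then [part] else [])) []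
      = bScan token.toList [] := by
  rw [bScan_eq token.toList []]
  simp only [splitOn_eq_mySplit, List.reverse_nil]
  obtain ⟨p, ps, hps⟩ := List.exists_cons_of_ne_nil (mySplit_ne_nil token.toList [])
  rw [hps, foldA_eq_flatMap]
  simp only [emitH, List.map_cons, List.headD_cons, List.drop_one, List.tail_cons]
  congr 1
  · by_cases hp : p = []
    · simp [hp]
    · rw [if_pos ((ofList_ne_empty_iff p).mpr hp), if_pos hp]
  · rw [List.flatMap_map]
    congr 1
    funext q
    by_cases hq : q = []
    · simp [emitPart, hq]
    · simp only [emitPart]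
      rw [if_pos ((ofList_ne_empty_iff q).mpr hq), if_pos hq]

theorem foldl_step_eq (acc : List String) (token : String) :
    (if PySem.Str.isIn "-" token then
      let parts : List String := (PySem.Chars.splitOn token.toList ['-']).map String.ofList
      if !(parts.map PySem.Str.strIsdigit).all (· = true) then
        (acc ++ (if parts.headD "" ≠ "" then [parts.headD ""] else []))
          ++ (parts.drop 1).foldl
              (fun a part => (a ++ ["-"]) ++ (if part ≠ "" then [part] else [])) []
      else acc ++ [token]
    else acc ++ [token])
    = (if PySem.Str.isIn "-" token &&
          !(((PySem.Chars.splitOn token.toList ['-']).map String.ofList).map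
              PySem.Str.strIsdigit).all (· = true) then
        acc ++ bScan token.toList []
      else acc ++ [token]) := by
  cases hin : PySem.Str.isIn "-" token with
  | false => simp only [Bool.false_and, Bool.false_eq_true, if_false]
  | true =>
    rw [if_pos rfl]
    cases hb : (((PySem.Chars.splitOn token.toList ['-']).map String.ofList).map
        PySem.Str.strIsdigit).all (· = true) with
    | true =>
      simp only [hb, Bool.not_true, Bool.true_and, Bool.false_eq_true, if_false]
    | false =>
      simp only [hb, Bool.not_false, Bool.true_and, if_true]
      rw [List.append_assoc, token_emit_eq token]

-- ===== VERDICT (by name: the statement is the Claim_ definition above) =====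
theorem clean_dash_tokens_spec : Claim_equal_clean_dash_tokens := by
  intro tokens _
  unfold Spec_clean_dash_tokens clean_dash_tokens clean_dash_tokens_alt
  congr 1
  funext acc token
  exact foldl_step_eq acc token
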